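-- pv_equiv track=rewrite | github.com/r00tkitty/rootkittenWeather | backend/main.py | pick_daily_icon
-- ===== SOURCE A (Python) =====
-- def map_weather_code(code: int) -> str: # map the weather code to a string
--     mapping = {
--         0: "clear",
--         1: "mainly_clear",
--         2: "partly_cloudy",
--         3: "overcast",
--         45: "fog", 48: "fog",
--         51: "drizzle_light", 53: "drizzle_moderate", 55: "drizzle_dense",
--         61: "rain_light", 63: "rain_moderate", 65: "rain_heavy",
--         66: "freezing_rain_light", 67: "freezing_rain_heavy",
--         71: "snow_light", 73: "snow_moderate", 75: "snow_heavy", 77: "snow_grains",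
--         80: "showers_light", 81: "showers_moderate", 82: "showers_violent",
--         85: "snow_showers_light", 86: "snow_showers_heavy",
--         95: "thunderstorm", 96: "thunderstorm_hail", 99: "thunderstorm_hail_heavy",
--     }
--     return mapping.get(int(code) if code is not None else -1, "unknown") # return the mapped string, return -1 if code is empty, and "unknown" if not found
--
-- def pick_daily_icon(day_str : str, hourly_times: list[str], hourly_codes: list[int]) -> str: # pick the daily icon based on the hourly data
--     target = f"{day_str}T12:00" # target time is noon on the given day
--     try: # try to find the target time in the hourly times
--         idx = hourly_times.index(target) # get the index of the target time
--         return map_weather_code(hourly_codes[idx]) # return the mapped weather code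
--     except ValueError: # if not found, fall back to first entry of that day
--         for i, t in enumerate(hourly_times): # for each time in hourly times
--             if t.startswith(day_str): # if the time starts with the day string
--                 return map_weather_code(hourly_codes[i]) # return the mapped weather code
--     return "unknown" # if all else fails, return unknown
-- ===== SOURCE B (Python) =====
-- def map_weather_code(code: int) -> str:
--     mapping = {
--         0: "clear",
--         1: "mainly_clear",
--         2: "partly_cloudy",
--         3: "overcast",
--         45: "fog", 48: "fog",
--         51: "drizzle_light", 53: "drizzle_moderate", 55: "drizzle_dense",
--         61: "rain_light", 63: "rain_moderate", 65: "rain_heavy",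
--         66: "freezing_rain_light", 67: "freezing_rain_heavy",
--         71: "snow_light", 73: "snow_moderate", 75: "snow_heavy", 77: "snow_grains",
--         80: "showers_light", 81: "showers_moderate", 82: "showers_violent",
--         85: "snow_showers_light", 86: "snow_showers_heavy",
--         95: "thunderstorm", 96: "thunderstorm_hail", 99: "thunderstorm_hail_heavy",
--     }
--     return mapping.get(int(code) if code is not None else -1, "unknown")
--
-- def pick_daily_icon(day_str: str, hourly_times: list[str], hourly_codes: list[int]) -> str:
--     # One backward sweep: overwriting right-to-left leaves the LEFTMOST noon match
--     # in `noon` and the leftmost other same-day entry in `first`; noon wins.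
--     target = f"{day_str}T12:00"
--     noon = None
--     first = None
--     for i, t in reversed(list(enumerate(hourly_times))):
--         if t == target:
--             noon = i
--         elif t.startswith(day_str):
--             first = i
--     idx = noon if noon is not None else first
--     if idx is None:
--         return "unknown"
--     return map_weather_code(hourly_codes[idx])
-- ===== Notes on version B (the rewrite author's own statement) =====
-- stated objective: alternative
-- what changed: Replaced list.index + try/except + a second forward enumerate scan with a single backward sweep that overwrites two trackers (leftmost noon index, leftmost same-day index) and then picks noon first.
import Mathlib
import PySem

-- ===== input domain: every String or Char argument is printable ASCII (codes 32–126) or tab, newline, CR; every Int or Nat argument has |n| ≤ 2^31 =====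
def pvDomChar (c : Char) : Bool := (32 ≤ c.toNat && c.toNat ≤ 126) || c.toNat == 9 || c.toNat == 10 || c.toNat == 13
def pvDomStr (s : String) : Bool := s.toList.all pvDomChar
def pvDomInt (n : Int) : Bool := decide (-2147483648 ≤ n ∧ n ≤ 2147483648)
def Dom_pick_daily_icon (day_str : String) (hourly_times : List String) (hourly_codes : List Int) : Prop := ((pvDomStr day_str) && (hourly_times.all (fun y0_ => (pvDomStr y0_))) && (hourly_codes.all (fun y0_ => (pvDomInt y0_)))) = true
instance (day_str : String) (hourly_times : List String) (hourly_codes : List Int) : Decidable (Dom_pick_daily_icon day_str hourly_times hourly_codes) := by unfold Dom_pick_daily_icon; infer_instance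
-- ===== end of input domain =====

-- B replaces A's index()+try/except+second forward scan by one backward sweep with two
-- trackers (alternative decomposition, same O(n) cost); equivalence of RETURN values only.

-- ===== PORT A =====
def map_weather_code (code : Int) : String :=
  let mapping : PySem.Dict Int String :=
    PySem.Dict.ofList [(0, "clear"), (1, "mainly_clear"), (2, "partly_cloudy"), (3, "overcast"),
     (45, "fog"), (48, "fog"),
     (51, "drizzle_light"), (53, "drizzle_moderate"), (55, "drizzle_dense"),
     (61, "rain_light"), (63, "rain_moderate"), (65, "rain_heavy"),
     (66, "freezing_rain_light"), (67, "freezing_rain_heavy"),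
     (71, "snow_light"), (73, "snow_moderate"), (75, "snow_heavy"), (77, "snow_grains"),
     (80, "showers_light"), (81, "showers_moderate"), (82, "showers_violent"),
     (85, "snow_showers_light"), (86, "snow_showers_heavy"),
     (95, "thunderstorm"), (96, "thunderstorm_hail"), (99, "thunderstorm_hail_heavy")]
  PySem.Dict.getD mapping code "unknown"

-- A's fallback loop: 'for i, t in enumerate(hourly_times): if t.startswith(day_str): return …'
def pvAloop (day_str : String) (hourly_codes : List Int) : List (Int × String) → String
  | [] => "unknown"
  | (i, t) :: rest =>
      if PySem.Str.startswith t day_str then map_weather_code (PySem.List.pyGetD hourly_codes i 0)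
      else pvAloop day_str hourly_codes rest

def pick_daily_icon (day_str : String) (hourly_times : List String) (hourly_codes : List Int) : String :=
  let target := day_str ++ "T12:00"
  match PySem.List.index? hourly_times target with
  | some idx => map_weather_code (PySem.List.pyGetD hourly_codes (Int.ofNat idx) 0)
  | none => pvAloop day_str hourly_codes (PySem.List.enumerate hourly_times)

-- ===== PORT B =====
-- one step of B's backward sweep
def pvBstep (day_str target : String) (acc : Option Int × Option Int) (p : Int × String) :
    Option Int × Option Int :=
  if p.2 == target then (some p.1, acc.2)
  else if PySem.Str.startswith p.2 day_str then (acc.1, some p.1)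
  else acc

def pick_daily_icon_alt (day_str : String) (hourly_times : List String) (hourly_codes : List Int) : String :=
  let target := day_str ++ "T12:00"
  let nf := (PySem.List.enumerate hourly_times).reverse.foldl (pvBstep day_str target)
              (none, none)
  match (match nf.1 with | some n => some n | none => nf.2) with
  | some i => map_weather_code (PySem.List.pyGetD hourly_codes i 0)
  | none => "unknown"

-- ===== PRECONDITION & SPEC =====
-- Pre_ excludes exactly the inputs where Python A raises IndexError: the chosen hourly
-- index (the first noon match, else the first same-day entry) is ≥ len(hourly_codes).
def Pre_pick_daily_icon (day_str : String) (hourly_times : List String) (hourly_codes : List Int) : Prop :=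
  (match PySem.List.index? hourly_times (day_str ++ "T12:00") with
   | some i => decide (i < hourly_codes.length)
   | none =>
     match hourly_times.findIdx? (fun t => PySem.Str.startswith t day_str) with
     | some j => decide (j < hourly_codes.length)
     | none => true) = true

instance (day_str : String) (hourly_times : List String) (hourly_codes : List Int) : Decidable (Pre_pick_daily_icon day_str hourly_times hourly_codes) := by unfold Pre_pick_daily_icon; infer_instance

def pvWitness_pick_daily_icon : String × List String × List Int :=
  ("2024-01-02", ["2024-01-02T09:00", "2024-01-02T12:00"], [61, 0])

def Spec_pick_daily_icon (day_str : String) (hourly_times : List String) (hourly_codes : List Int) (out : String) : Prop := out = pick_daily_icon_alt day_str hourly_times hourly_codes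
instance (day_str : String) (hourly_times : List String) (hourly_codes : List Int) (out : String) : Decidable (Spec_pick_daily_icon day_str hourly_times hourly_codes out) := by unfold Spec_pick_daily_icon; infer_instance

-- ===== CLAIM (what is proved, stated in full; the proofs are below) =====
def Claim_equal_pick_daily_icon : Prop := ∀ (day_str : String) (hourly_times : List String) (hourly_codes : List Int), Dom_pick_daily_icon day_str hourly_times hourly_codes → Pre_pick_daily_icon day_str hourly_times hourly_codes → Spec_pick_daily_icon day_str hourly_times hourly_codes (pick_daily_icon day_str hourly_times hourly_codes)

-- ===== LEMMAS AND PROOFS =====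

-- A's fallback loop over an enumeration, characterised by findIdx?.
theorem pvAloop_enumerate (day_str : String) (codes : List Int) (xs : List String) (s : Int) :
    pvAloop day_str codes (PySem.List.enumerate xs s) =
      match xs.findIdx? (fun t => PySem.Str.startswith t day_str) with
      | some j => map_weather_code (PySem.List.pyGetD codes (s + (j : Int)) 0)
      | none => "unknown" := by
  induction xs generalizing s with
  | nil => simp [PySem.List.enumerate_nil, pvAloop]
  | cons x xs ih =>
    rw [PySem.List.enumerate_cons]
    simp only [pvAloop, List.findIdx?_cons, PySem.Str.startswith_eq] at ih ⊢
    by_cases hx : PySem.Chars.startswith x.toList day_str.toList = true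
    · simp [hx]
    · simp only [hx, Bool.false_eq_true, if_false, ih]
      cases h : xs.findIdx? (fun t => PySem.Chars.startswith t.toList day_str.toList) with
      | none => simp
      | some j => simp; ring_nf

theorem pvB_fold (day_str target : String) (xs : List String) (s : Int)
    (acc : Option Int × Option Int) :
    (PySem.List.enumerate xs s).reverse.foldl (pvBstep day_str target) acc =
      ((match PySem.List.index? xs target with
        | some i => some (s + (i : Int))
        | none => acc.1),
       (match xs.findIdx? (fun t => t ≠ target ∧ PySem.Str.startswith t day_str) with
        | some j => some (s + (j : Int))
        | none => acc.2)) := by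
  induction xs generalizing s acc with
  | nil => simp [PySem.List.enumerate_nil, PySem.List.index?_eq_idxOf?]
  | cons x xs ih =>
    rw [PySem.List.enumerate_cons, List.reverse_cons, List.foldl_append, ih]
    simp only [List.foldl_cons, List.foldl_nil, pvBstep, PySem.List.index?_eq_idxOf?,
      List.idxOf?_cons, List.findIdx?_cons, PySem.Str.startswith_eq] at ih ⊢
    by_cases hb : (x == target) = true
    · simp only [hb, if_true]
      have hx : x = target := by simpa using hb
      have : ¬ (x ≠ target ∧ PySem.Chars.startswith x.toList day_str.toList = true) := by simp [hx]
      simp only [this, decide_false, Bool.false_eq_true, if_false]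
      cases h : List.findIdx? (fun t => !decide (t = target) && PySem.Chars.startswith t.toList day_str.toList) xs <;>
        simp [h] <;> ring_nf
    · simp only [hb, Bool.false_eq_true, if_false]
      have hx : x ≠ target := by simpa using hb
      by_cases hs : PySem.Chars.startswith x.toList day_str.toList = true
      · have hp : (x ≠ target ∧ PySem.Chars.startswith x.toList day_str.toList = true) := ⟨hx, hs⟩
        simp only [hs, if_true]
        cases h : List.idxOf? target xs <;> simp [hx] <;> ring_nf
      · have hp : ¬ (x ≠ target ∧ PySem.Chars.startswith x.toList day_str.toList = true) := fun h => hs h.2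
        simp only [hs, Bool.false_eq_true, if_false]
        cases h1 : List.idxOf? target xs <;>
        cases h2 : List.findIdx? (fun t => !decide (t = target) && PySem.Chars.startswith t.toList day_str.toList) xs <;>
          simp [h2, hx] <;> ring_nf <;> simp

theorem pvFindIdx_congr {p q : String → Bool} (xs : List String)
    (h : ∀ x ∈ xs, p x = q x) : xs.findIdx? p = xs.findIdx? q := by
  induction xs with
  | nil => rfl
  | cons x xs ih =>
    simp only [List.findIdx?_cons, h x (by simp)]
    rw [ih (fun y hy => h y (by simp [hy]))]

theorem pick_daily_icon_spec : Claim_equal_pick_daily_icon := by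
  intro day times codes _ hpre
  unfold Spec_pick_daily_icon pick_daily_icon pick_daily_icon_alt
  simp only [pvB_fold]
  cases hidx : PySem.List.index? times (day ++ "T12:00") with
  | some i => simp
  | none =>
    have hmem : (day ++ "T12:00") ∉ times := by
      rw [← PySem.List.index?_eq_none_iff (v := day ++ "T12:00")]; exact hidx
    simp only
    rw [pvAloop_enumerate]
    rw [pvFindIdx_congr (p := fun t => decide (t ≠ day ++ "T12:00" ∧ PySem.Str.startswith t day))
          (q := fun t => PySem.Str.startswith t day)
          times (fun x hx => by
            have : x ≠ day ++ "T12:00" := fun h => hmem (h ▸ hx)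
            simp [this])]
    cases h : times.findIdx? (fun t => PySem.Str.startswith t day) with
    | none => simp
    | some j => simp
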